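-- pv_equiv track=rewrite | github.com/cstenkamp/cv_builder | build_latex.py | _smart_quotes
-- ===== SOURCE A (Python) =====
-- def _smart_quotes(t: str) -> str:
--     out = []
--     openq = True
--     i = 0
--     while i < len(t):
--         c = t[i]
--         if c == '"' and (i == 0 or t[i-1] != "\\"):
--             out.append("``" if openq else "''")
--             openq = not openq
--         else:
--             out.append(c)
--         i += 1
--     return "".join(out)
-- ===== SOURCE B (Python) =====
-- def _smart_quotes(t: str) -> str:
--     parts = t.split('"')
--     res = [parts[0]]
--     openq = True
--     for prev, part in zip(parts, parts[1:]):
--         if prev.endswith('\\'):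
--             res.append('"')
--         else:
--             res.append('``' if openq else "''")
--             openq = not openq
--         res.append(part)
--     return ''.join(res)
-- ===== Notes on version B (the rewrite author's own statement) =====
-- stated objective: faster
-- what changed: Replaces A's per-character index loop (with a manual look-behind escape check) by splitting the string once on the double-quote character and rejoining the pieces with alternating LaTeX quote marks, treating a separator as escaped when the preceding piece ends with a backslash.
import Mathlib
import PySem

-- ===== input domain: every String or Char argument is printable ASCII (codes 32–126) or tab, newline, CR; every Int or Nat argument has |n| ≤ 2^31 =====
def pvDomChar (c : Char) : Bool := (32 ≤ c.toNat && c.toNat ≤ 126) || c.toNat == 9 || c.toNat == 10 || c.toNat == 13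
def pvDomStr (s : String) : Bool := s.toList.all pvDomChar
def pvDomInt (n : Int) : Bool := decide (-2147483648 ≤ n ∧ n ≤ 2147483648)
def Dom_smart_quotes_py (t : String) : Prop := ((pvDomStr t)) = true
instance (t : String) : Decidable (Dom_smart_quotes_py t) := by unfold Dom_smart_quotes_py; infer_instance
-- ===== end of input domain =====

-- B replaces A's per-character index loop by split-on-'"' plus a rejoin that alternates the
-- quote marks between the pieces (escapedness read off the preceding piece's last character);
-- objective: faster (a timing run measured B faster; same O(n), C-level split/join vs a per-char loop).

-- ===== PORT A =====
-- A's while loop over index i, accumulating the output pieces in `out` (Python appends to a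
-- list of strings and joins with "").
def aLoop (cs : List Char) (openq : Bool) (i : Nat) (out : List (List Char)) : List (List Char) :=
  if h : i < cs.length then
    let c := cs[i]
    if c = '"' ∧ (i = 0 ∨ cs[i-1]! ≠ '\\') then
      aLoop cs (!openq) (i+1) (out ++ [if openq then ['`','`'] else ['\'','\'']])
    else
      aLoop cs openq (i+1) (out ++ [[c]])
  else out
termination_by cs.length - i

def smart_quotes_py (t : String) : String :=
  String.ofList (PySem.Chars.join [] (aLoop t.toList true 0 []))

-- ===== PORT B =====
-- B's loop body: for (prev, part) in zip(parts, parts[1:]) append the separator replacement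
-- (verbatim '"' when prev ends with a backslash, else the alternating quote) and the part.
def bStep (st : List (List Char) × Bool) (pp : List Char × List Char) : List (List Char) × Bool :=
  if PySem.Chars.endswith pp.1 ['\\'] then
    (st.1 ++ [['"'], pp.2], st.2)
  else
    (st.1 ++ [if st.2 then ['`','`'] else ['\'','\''], pp.2], !st.2)

def smart_quotes_py_alt (t : String) : String :=
  let parts := PySem.Chars.splitOn t.toList ['"']
  let st := (List.zip parts parts.tail).foldl bStep ([parts.headI], true)
  String.ofList (PySem.Chars.join [] st.1)

-- ===== PRECONDITION & SPEC =====
def Spec_smart_quotes_py (t : String) (out : String) : Prop := out = smart_quotes_py_alt t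
instance (t : String) (out : String) : Decidable (Spec_smart_quotes_py t out) := by unfold Spec_smart_quotes_py; infer_instance

-- ===== CLAIM (what is proved, stated in full; the proofs are below) =====
def Claim_equal_smart_quotes_py : Prop := ∀ (t : String), Dom_smart_quotes_py t → Spec_smart_quotes_py t (smart_quotes_py t)

-- ===== LEMMAS AND PROOFS =====

-- "".join is flatten
theorem join_nil_flatten : ∀ (ps : List (List Char)), PySem.Chars.join [] ps = ps.flatten
  | [] => rfl
  | [a] => by simp [PySem.Chars.join, List.intercalate]
  | a :: b :: l => by
    have ih := join_nil_flatten (b :: l)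
    simp [PySem.Chars.join, List.intercalate, List.intersperse_cons₂] at ih ⊢
    exact ih

-- structural recursion equivalent of split-on-'"'
def mySplit : List Char → List (List Char)
  | [] => [[]]
  | c :: l =>
    if c = '"' then [] :: mySplit l
    else
      match mySplit l with
      | [] => [[c]]      -- unreachable: mySplit is never []
      | p :: ps => (c :: p) :: ps

theorem mySplit_ne_nil (l : List Char) : mySplit l ≠ [] := by
  cases l with
  | nil => simp [mySplit]
  | cons c l =>
    simp only [mySplit]
    split
    · simp
    · rcases h : mySplit l with _ | ⟨p, ps⟩ <;> simp

-- the fuelled splitter of PySem computes mySplit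
theorem go_spec : ∀ (fuel : Nat) (l cur : List Char) (acc : List (List Char)),
    l.length ≤ fuel →
    PySem.Chars.splitOn.go ['"'] fuel l cur acc
      = acc.reverse ++ (cur.reverse ++ (mySplit l).headI) :: (mySplit l).tail := by
  intro fuel
  induction fuel with
  | zero =>
    intro l cur acc hl
    have : l = [] := by cases l <;> simp_all
    subst this
    simp [PySem.Chars.splitOn.go, mySplit]
  | succ fuel ih =>
    intro l cur acc hl
    cases l with
    | nil => simp [PySem.Chars.splitOn.go, mySplit]
    | cons c rest =>
      rw [PySem.Chars.splitOn.go]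
      by_cases hc : c = '"'
      · subst hc
        have hpre : List.isPrefixOf ['"'] ('"' :: rest) = true := by simp [List.isPrefixOf]
        rw [if_pos hpre]
        simp only [List.length_cons] at hl
        simp only [List.length_cons, List.length_nil, List.drop_succ_cons, List.drop_zero]
        rw [ih rest [] (cur.reverse :: acc) (by omega)]
        rcases h : mySplit rest with _ | ⟨p, ps⟩
        · exact absurd h (mySplit_ne_nil rest)
        · simp [mySplit, h]
      · have hpre : List.isPrefixOf ['"'] (c :: rest) = false := by
          simp [List.isPrefixOf]; exact fun h => absurd h.symm hc
        rw [if_neg (by simp [hpre])]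
        simp only [List.length_cons] at hl
        rw [ih rest (c :: cur) acc (by omega)]
        rcases h : mySplit rest with _ | ⟨p, ps⟩
        · exact absurd h (mySplit_ne_nil rest)
        · simp [mySplit, h, if_neg hc]

theorem splitOn_eq_mySplit (l : List Char) : PySem.Chars.splitOn l ['"'] = mySplit l := by
  rw [PySem.Chars.splitOn, go_spec (l.length + 1) l [] [] (by omega)]
  rcases h : mySplit l with _ | ⟨p, ps⟩
  · exact absurd h (mySplit_ne_nil l)
  · simp

-- reference scan: remaining characters, "previous char was a backslash" flag, open/close flag
def scanRef : List Char → Bool → Bool → List Char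
  | [], _, _ => []
  | c :: l, pb, openq =>
    if c = '"' ∧ pb = false then
      (if openq then ['`', '`'] else ['\'', '\'']) ++ scanRef l false (!openq)
    else
      c :: scanRef l (decide (c = '\\')) openq

def pbAt (cs : List Char) (i : Nat) : Bool :=
  if i = 0 then false else decide (cs[i-1]! = '\\')

theorem aLoop_flatten (cs : List Char) (openq : Bool) (i : Nat) (out : List (List Char)) :
    (aLoop cs openq i out).flatten = out.flatten ++ scanRef (cs.drop i) (pbAt cs i) openq := by
  rw [aLoop]
  by_cases h : i < cs.length
  · rw [dif_pos h]
    have hdrop : cs.drop i = cs[i] :: cs.drop (i+1) := (List.getElem_cons_drop h).symm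
    have hpb1 : pbAt cs (i+1) = decide (cs[i] = '\\') := by
      simp [pbAt, List.getElem!_eq_getElem?_getD, List.getElem?_eq_getElem h]
    have hcond : (cs[i] = '"' ∧ (i = 0 ∨ cs[i-1]! ≠ '\\')) ↔ (cs[i] = '"' ∧ pbAt cs i = false) := by
      unfold pbAt
      by_cases hi : i = 0 <;> simp [hi]
    by_cases hA : cs[i] = '"' ∧ (i = 0 ∨ cs[i-1]! ≠ '\\')
    · rw [if_pos hA]
      rw [aLoop_flatten cs (!openq) (i+1) _]
      rw [hdrop]
      have hq : decide (cs[i] = '\\') = false := by rw [hA.1]; decide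
      simp only [scanRef, if_pos (hcond.mp hA), hpb1, hq]
      simp
    · rw [if_neg hA]
      rw [aLoop_flatten cs openq (i+1) _]
      rw [hdrop]
      simp only [scanRef, if_neg (fun hc => hA (hcond.mpr hc)), hpb1]
      simp
  · rw [dif_neg h]
    rw [List.drop_eq_nil_of_le (by omega)]
    simp [scanRef]
termination_by cs.length - i

-- escape flags
def escOf (p : List Char) : Bool := decide (p.getLast? = some '\\')
def hFirst (p : List Char) (pb : Bool) : Bool := if p = [] then pb else escOf p

theorem endswith_backslash (p : List Char) : PySem.Chars.endswith p ['\\'] = escOf p := by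
  induction p using List.reverseRecOn with
  | nil => simp [PySem.Chars.endswith, escOf, List.isSuffixOf]
  | append_singleton xs x ih =>
    rw [PySem.Chars.endswith, List.isSuffixOf, List.reverse_append]
    simp only [List.reverse_cons, List.reverse_nil, List.nil_append, List.cons_append,
      List.isPrefixOf, Bool.and_true, escOf, List.getLast?_concat]
    by_cases hx : x = '\\'
    · subst hx; decide
    · rw [beq_eq_false_iff_ne.mpr (Ne.symm hx), decide_eq_false (by simp [hx])]

theorem hFirst_false (p : List Char) : hFirst p false = escOf p := by
  cases p <;> simp [hFirst, escOf]

theorem hFirst_cons (c : Char) (p : List Char) (pb : Bool) :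
    hFirst p (decide (c = '\\')) = hFirst (c :: p) pb := by
  cases p with
  | nil => simp [hFirst, escOf]
  | cons d q => simp [hFirst, escOf, List.getLast?_cons_cons]

-- the pieces B's fold appends after the first part
def sepPieces : List (List Char) → Bool → Bool → List (List Char)
  | [], _, _ => []
  | p :: ps, esc, openq =>
    if esc then ['"'] :: p :: sepPieces ps (escOf p) openq
    else (if openq then ['`', '`'] else ['\'', '\'']) :: p :: sepPieces ps (escOf p) (!openq)

theorem foldl_bStep : ∀ (ps : List (List Char)) (prev : List Char) (res : List (List Char)) (openq : Bool),
    ((List.zip (prev :: ps) ps).foldl bStep (res, openq)).1 = res ++ sepPieces ps (escOf prev) openq := by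
  intro ps
  induction ps with
  | nil => intro prev res openq; simp [sepPieces]
  | cons p ps ih =>
    intro prev res openq
    simp only [List.zip_cons_cons, List.foldl_cons]
    rw [show bStep (res, openq) (prev, p)
        = if escOf prev then (res ++ [['"'], p], openq)
          else (res ++ [if openq then ['`','`'] else ['\'','\''], p], !openq) from by
      simp [bStep, endswith_backslash]]
    by_cases he : escOf prev
    · rw [if_pos he, ih p _ openq]
      simp [sepPieces, he]
    · rw [if_neg he, ih p _ (!openq)]
      simp [sepPieces, he]

-- scanning a string is: its first split part, then the alternating rejoin of the rest
theorem mySplit_quote (l : List Char) : mySplit ('"' :: l) = [] :: mySplit l := by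
  simp [mySplit]

theorem mySplit_cons_ne {c : Char} (hc : c ≠ '"') {l p : List Char} {ps : List (List Char)}
    (hr : mySplit l = p :: ps) : mySplit (c :: l) = (c :: p) :: ps := by
  simp [mySplit, hc, hr]

-- scanning a string is: its first split part, then the alternating rejoin of the rest
theorem scan_split : ∀ (l : List Char) (pb openq : Bool) (p : List Char) (ps : List (List Char)),
    mySplit l = p :: ps →
    scanRef l pb openq = p ++ (sepPieces ps (hFirst p pb) openq).flatten := by
  intro l
  induction l with
  | nil =>
    intro pb openq p ps h
    simp only [mySplit] at h
    obtain ⟨h1, h2⟩ := List.cons.inj h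
    subst h1; subst h2
    simp [scanRef, sepPieces]
  | cons c l ih =>
    intro pb openq p ps h
    rcases hr : mySplit l with _ | ⟨p', ps'⟩
    · exact absurd hr (mySplit_ne_nil l)
    by_cases hc : c = '"'
    · subst hc
      rw [mySplit_quote, hr] at h
      obtain ⟨h1, h2⟩ := List.cons.inj h
      subst h1; subst h2
      cases pb with
      | false =>
        rw [show scanRef ('"' :: l) false openq
            = (if openq then ['`', '`'] else ['\'', '\'']) ++ scanRef l false (!openq) from by
          simp [scanRef]]
        rw [ih false (!openq) p' ps' hr, hFirst_false]
        have h0 : hFirst [] false = false := rfl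
        rw [h0]
        simp [sepPieces]
      | true =>
        rw [show scanRef ('"' :: l) true openq = '"' :: scanRef l false openq from by
          simp [scanRef]]
        rw [ih false openq p' ps' hr, hFirst_false]
        have h1 : hFirst [] true = true := rfl
        rw [h1]
        simp [sepPieces]
    · rw [mySplit_cons_ne hc hr] at h
      obtain ⟨h1, h2⟩ := List.cons.inj h
      subst h1; subst h2
      have hnc : ¬ (c = '"' ∧ pb = false) := fun hx => hc hx.1
      simp only [scanRef, if_neg hnc]
      rw [ih (decide (c = '\\')) openq p' ps' hr, hFirst_cons c p' pb]
      simp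

-- ===== VERDICT (by name: the statement is the Claim_ definition above) =====
theorem smart_quotes_py_spec : Claim_equal_smart_quotes_py := by
  intro t _
  show smart_quotes_py t = smart_quotes_py_alt t
  rcases h : mySplit t.toList with _ | ⟨p, ps⟩
  · exact absurd h (mySplit_ne_nil t.toList)
  simp only [smart_quotes_py, smart_quotes_py_alt, splitOn_eq_mySplit, h]
  rw [join_nil_flatten, join_nil_flatten, aLoop_flatten]
  simp only [List.headI_cons, List.tail_cons]
  rw [foldl_bStep ps p [p] true, List.drop_zero]
  have hpb : pbAt t.toList 0 = false := rfl
  rw [hpb, scan_split t.toList false true p ps h, hFirst_false]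
  simp
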